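-- pv_equiv track=rewrite | github.com/DevbyNaveen/X7BD | app/routes/menu.py | _auto_categorize_item
-- ===== SOURCE A (Python) =====
-- def _auto_categorize_item(item_name: str) -> str:
--     """Simple auto-categorization based on item name patterns"""
--     name_lower = item_name.lower()
--
--     # Food categories
--     if any(word in name_lower for word in ["pizza", "pasta", "burger", "sandwich"]):
--         return "Main Dishes"
--     elif any(word in name_lower for word in ["salad", "soup", "appetizer"]):
--         return "Appetizers"
--     elif any(word in name_lower for word in ["dessert", "cake", "ice cream", "cookie"]):
--         return "Desserts"
--     elif any(word in name_lower for word in ["drink", "beverage", "coffee", "tea", "soda"]):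
--         return "Beverages"
--     elif any(word in name_lower for word in ["side", "fries", "chips"]):
--         return "Sides"
--     else:
--         return "General"
-- ===== SOURCE B (Python) =====
-- # B: single left-to-right scan of the name; at each position try every keyword with
-- # startswith and keep the smallest category priority seen (multi-pattern scan instead
-- # of per-keyword containment tests / an if-elif chain).
-- _CATEGORIES = ["Main Dishes", "Appetizers", "Desserts", "Beverages", "Sides"]
-- _KEYWORD_PRIORITY = [
--     ("pizza", 0), ("pasta", 0), ("burger", 0), ("sandwich", 0),
--     ("salad", 1), ("soup", 1), ("appetizer", 1),
--     ("dessert", 2), ("cake", 2), ("ice cream", 2), ("cookie", 2),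
--     ("drink", 3), ("beverage", 3), ("coffee", 3), ("tea", 3), ("soda", 3),
--     ("side", 4), ("fries", 4), ("chips", 4),
-- ]
--
-- def _auto_categorize_item(item_name: str) -> str:
--     name_lower = item_name.lower()
--     best = len(_CATEGORIES)
--     for i in range(len(name_lower)):
--         for kw, pri in _KEYWORD_PRIORITY:
--             if pri < best and name_lower.startswith(kw, i):
--                 best = pri
--     return _CATEGORIES[best] if best < len(_CATEGORIES) else "General"
-- ===== Notes on version B (the rewrite author's own statement) =====
-- stated objective: alternative
-- what changed: Replaced the if/elif chain of per-keyword containment tests with a single left-to-right scan over the lowered name that tries every keyword with startswith at each position and keeps the smallest category priority, then maps that priority to its category.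
import Mathlib
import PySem

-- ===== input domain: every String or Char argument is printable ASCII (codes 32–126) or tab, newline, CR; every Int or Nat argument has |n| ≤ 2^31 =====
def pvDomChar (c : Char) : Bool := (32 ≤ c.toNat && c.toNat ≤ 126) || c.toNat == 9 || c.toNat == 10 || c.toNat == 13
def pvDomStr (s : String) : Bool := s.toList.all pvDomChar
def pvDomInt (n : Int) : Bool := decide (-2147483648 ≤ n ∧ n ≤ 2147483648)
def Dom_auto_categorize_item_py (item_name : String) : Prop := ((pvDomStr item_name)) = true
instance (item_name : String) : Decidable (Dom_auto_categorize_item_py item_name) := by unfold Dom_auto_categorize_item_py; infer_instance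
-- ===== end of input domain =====

-- B replaces the if/elif chain of containment tests by one left-to-right scan of the
-- lowered name keeping the smallest matched category priority (alternative decomposition).

-- ===== PORT A =====
def auto_categorize_item_py (item_name : String) : String :=
  let name_lower := PySem.Str.lower item_name
  if ["pizza", "pasta", "burger", "sandwich"].any (fun word => PySem.Str.isIn word name_lower) then
    "Main Dishes"
  else if ["salad", "soup", "appetizer"].any (fun word => PySem.Str.isIn word name_lower) then
    "Appetizers"
  else if ["dessert", "cake", "ice cream", "cookie"].any (fun word => PySem.Str.isIn word name_lower) then
    "Desserts"
  else if ["drink", "beverage", "coffee", "tea", "soda"].any (fun word => PySem.Str.isIn word name_lower) then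
    "Beverages"
  else if ["side", "fries", "chips"].any (fun word => PySem.Str.isIn word name_lower) then
    "Sides"
  else
    "General"

-- ===== PORT B =====
def pvCats : List String := ["Main Dishes", "Appetizers", "Desserts", "Beverages", "Sides"]

def pvKw : List (List Char × Nat) :=
  [ ("pizza".toList, 0), ("pasta".toList, 0), ("burger".toList, 0), ("sandwich".toList, 0),
    ("salad".toList, 1), ("soup".toList, 1), ("appetizer".toList, 1),
    ("dessert".toList, 2), ("cake".toList, 2), ("ice cream".toList, 2), ("cookie".toList, 2),
    ("drink".toList, 3), ("beverage".toList, 3), ("coffee".toList, 3), ("tea".toList, 3), ("soda".toList, 3),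
    ("side".toList, 4), ("fries".toList, 4), ("chips".toList, 4) ]

-- name_lower.startswith(kw, i) with 0 ≤ i ≤ len is exactly 'kw is a prefix of the drop at i':
-- ported as PySem.Chars.startswith (chars.drop i) kw (exact on this range of i).
def auto_categorize_item_py_alt (item_name : String) : String :=
  let chars := (PySem.Str.lower item_name).toList
  let best :=
    (List.range chars.length).foldl
      (fun b i =>
        pvKw.foldl
          (fun b' kp =>
            if kp.2 < b' && PySem.Chars.startswith (chars.drop i) kp.1 then kp.2 else b')
          b)
      pvCats.length
  if best < pvCats.length then pvCats.getD best "General" else "General"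

-- ===== PRECONDITION & SPEC =====
def Spec_auto_categorize_item_py (item_name : String) (out : String) : Prop := out = auto_categorize_item_py_alt item_name
instance (item_name : String) (out : String) : Decidable (Spec_auto_categorize_item_py item_name out) := by unfold Spec_auto_categorize_item_py; infer_instance

-- ===== CLAIM (what is proved, stated in full; the proofs are below) =====
def Claim_equal_auto_categorize_item_py : Prop := ∀ (item_name : String), Dom_auto_categorize_item_py item_name → Spec_auto_categorize_item_py item_name (auto_categorize_item_py item_name)

-- ===== LEMMAS AND PROOFS =====

-- the flattened fold B performs, as a single foldl over (position, row) pairs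
def pvFold (chars : List Char) (l : List (Nat × (List Char × Nat))) (b : Nat) : Nat :=
  l.foldl
    (fun b' x =>
      if x.2.2 < b' && PySem.Chars.startswith (chars.drop x.1) x.2.1 then x.2.2 else b')
    b

def pvMatch (chars : List Char) (x : Nat × (List Char × Nat)) : Prop :=
  PySem.Chars.startswith (chars.drop x.1) x.2.1 = true

lemma pvFold_le_init (chars : List Char) (l : List (Nat × (List Char × Nat))) (b : Nat) :
    pvFold chars l b ≤ b := by
  induction l generalizing b with
  | nil => simp [pvFold]
  | cons y t ih =>
    simp only [pvFold, List.foldl_cons]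
    split
    · exact le_trans (ih _) (by
        rename_i h
        have := (Bool.and_eq_true ..).mp h |>.1
        exact Nat.le_of_lt (by simpa using of_decide_eq_true this))
    · exact ih b

lemma pvFold_le_of_mem (chars : List Char) (l : List (Nat × (List Char × Nat))) (b : Nat)
    (x : Nat × (List Char × Nat)) (hx : x ∈ l) (hm : pvMatch chars x) :
    pvFold chars l b ≤ x.2.2 := by
  induction l generalizing b with
  | nil => cases hx
  | cons y t ih =>
    simp only [pvFold, List.foldl_cons]
    rcases List.mem_cons.mp hx with rfl | hx'
    · by_cases hlt : x.2.2 < b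
      · rw [if_pos (by simpa [hlt, pvMatch] using hm)]
        exact pvFold_le_init ..
      · rw [if_neg (by simp [hlt])]
        exact le_trans (pvFold_le_init ..) (Nat.le_of_not_lt hlt)
    · split
      · exact ih _ hx'
      · exact ih _ hx'

lemma pvFold_ge (chars : List Char) (l : List (Nat × (List Char × Nat))) (b v : Nat)
    (hall : ∀ x ∈ l, pvMatch chars x → v ≤ x.2.2) (hb : v ≤ b) :
    v ≤ pvFold chars l b := by
  induction l generalizing b with
  | nil => simpa [pvFold] using hb
  | cons y t ih =>
    simp only [pvFold, List.foldl_cons]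
    split
    · rename_i h
      have hm : pvMatch chars y := (Bool.and_eq_true ..).mp h |>.2
      exact ih _ (fun x hx => hall x (List.mem_cons_of_mem _ hx)) (hall y (List.mem_cons_self ..) hm)
    · exact ih _ (fun x hx => hall x (List.mem_cons_of_mem _ hx)) hb

-- B's double loop is pvFold over the flattened (position × row) list
def pvPairs (n : Nat) : List (Nat × (List Char × Nat)) :=
  (List.range n).flatMap (fun i => pvKw.map (fun kp => (i, kp)))

lemma pvDouble_eq (chars : List Char) (is : List Nat) (b : Nat) :
    is.foldl
      (fun b i =>
        pvKw.foldl
          (fun b' kp =>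
            if kp.2 < b' && PySem.Chars.startswith (chars.drop i) kp.1 then kp.2 else b')
          b)
      b
    = pvFold chars (is.flatMap (fun i => pvKw.map (fun kp => (i, kp)))) b := by
  induction is generalizing b with
  | nil => simp [pvFold]
  | cons i t ih =>
    simp only [List.foldl_cons, List.flatMap_cons, pvFold, List.foldl_append, List.foldl_map]
    exact ih _

lemma mem_pvPairs (n : Nat) (x : Nat × (List Char × Nat)) :
    x ∈ pvPairs n ↔ x.1 < n ∧ x.2 ∈ pvKw := by
  cases x with
  | mk i kp =>
    simp [pvPairs, List.mem_flatMap, List.mem_range]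

-- 'some position of chars starts with kw' ↔ 'kw in chars', for nonempty kw
lemma exists_start_iff_isIn (chars kw : List Char) (hkw : kw ≠ []) :
    (∃ i < chars.length, PySem.Chars.startswith (chars.drop i) kw = true)
      ↔ PySem.Chars.isIn kw chars = true := by
  rw [← PySem.Chars.exists_prefix_drop_iff_isIn]
  constructor
  · rintro ⟨i, _, hs⟩
    exact ⟨i, (PySem.Chars.startswith_iff ..).mp hs⟩
  · rintro ⟨j, hj⟩
    by_cases hlt : j < chars.length
    · exact ⟨j, hlt, (PySem.Chars.startswith_iff ..).mpr hj⟩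
    · exfalso
      rw [List.drop_eq_nil_of_le (Nat.le_of_not_lt hlt)] at hj
      exact hkw (List.prefix_nil.mp hj)

lemma pvKw_ne_nil (kp : List Char × Nat) (h : kp ∈ pvKw) : kp.1 ≠ [] := by
  fin_cases h <;> simp

-- a matched pair of priority k yields 'some keyword of group k occurs', and conversely
lemma pvMatched_pri (chars : List Char) (x : Nat × (List Char × Nat))
    (hx : x ∈ pvPairs chars.length) (hm : pvMatch chars x) :
    PySem.Chars.isIn x.2.1 chars = true ∧ x.2 ∈ pvKw := by
  rcases (mem_pvPairs _ _).mp hx with ⟨hi, hkp⟩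
  refine ⟨?_, hkp⟩
  have hne : x.2.1 ≠ [] := pvKw_ne_nil x.2 hkp
  exact (exists_start_iff_isIn chars x.2.1 hne).mp ⟨x.1, hi, hm⟩

lemma pvIsIn_matched (chars kw : List Char) (pri : Nat) (hkp : (kw, pri) ∈ pvKw)
    (h : PySem.Chars.isIn kw chars = true) :
    ∃ x ∈ pvPairs chars.length, pvMatch chars x ∧ x.2.2 = pri := by
  have hne : kw ≠ [] := pvKw_ne_nil (kw, pri) hkp
  rcases (exists_start_iff_isIn chars kw hne).mpr h with ⟨i, hi, hs⟩
  exact ⟨(i, (kw, pri)), (mem_pvPairs _ _).mpr ⟨hi, hkp⟩, hs, rfl⟩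


lemma pvPairs_def (n : Nat) :
    (List.range n).flatMap (fun i => pvKw.map (fun kp => (i, kp))) = pvPairs n := rfl

-- A's five keyword groups, indexed by priority
def pvGroups : List (List String) :=
  [ ["pizza", "pasta", "burger", "sandwich"],
    ["salad", "soup", "appetizer"],
    ["dessert", "cake", "ice cream", "cookie"],
    ["drink", "beverage", "coffee", "tea", "soda"],
    ["side", "fries", "chips"] ]

lemma pvKw_pri_lt (kp : List Char × Nat) (h : kp ∈ pvKw) : kp.2 < 5 := by
  fin_cases h <;> simp

lemma pvKw_group (kp : List Char × Nat) (h : kp ∈ pvKw) :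
    ∃ w ∈ pvGroups.getD kp.2 [], w.toList = kp.1 := by
  fin_cases h <;> exact ⟨_, by simp [pvGroups], rfl⟩

lemma pvGroup_kw (k : Nat) (hk : k < 5) (w : String) (hw : w ∈ pvGroups.getD k []) :
    (w.toList, k) ∈ pvKw := by
  interval_cases k <;> fin_cases hw <;> simp [pvKw]

-- boolean 'some keyword of group k occurs in chars'
def pvM (chars : List Char) (k : Nat) : Bool :=
  (pvGroups.getD k []).any (fun w => PySem.Chars.isIn w.toList chars)

lemma pvMatch_iff (chars : List Char) (k : Nat) (hk : k < 5) :
    (∃ x ∈ pvPairs chars.length, pvMatch chars x ∧ x.2.2 = k) ↔ pvM chars k = true := by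
  constructor
  · rintro ⟨x, hx, hm, rfl⟩
    have ⟨hin, hkp⟩ := pvMatched_pri chars x hx hm
    rcases pvKw_group x.2 hkp with ⟨w, hw, hwl⟩
    exact List.any_eq_true.mpr ⟨w, hw, by rw [hwl]; exact hin⟩
  · intro h
    rcases List.any_eq_true.mp h with ⟨w, hw, hin⟩
    exact pvIsIn_matched chars w.toList k (pvGroup_kw k hk w hw) hin

-- the scan's result characterized through the group booleans
lemma pvFold_value (chars : List Char) :
    (∀ k, pvM chars k = true → pvFold chars (pvPairs chars.length) 5 ≤ k) ∧
    (∀ k, k ≤ 5 → (∀ j, j < k → pvM chars j = false) → k ≤ pvFold chars (pvPairs chars.length) 5) := by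
  constructor
  · intro k hmk
    by_cases hk : k < 5
    · rcases (pvMatch_iff chars k hk).mpr hmk with ⟨x, hx, hm, hpri⟩
      simpa [hpri] using pvFold_le_of_mem chars _ 5 x hx hm
    · exact le_trans (pvFold_le_init ..) (Nat.le_of_not_lt hk)
  · intro k hk5 hbelow
    refine pvFold_ge chars _ 5 k ?_ hk5
    intro x hx hm
    have ⟨hin, hkp⟩ := pvMatched_pri chars x hx hm
    by_contra hlt
    have hxk : x.2.2 < k := Nat.lt_of_not_le hlt
    have hxm : pvM chars x.2.2 = true :=
      (pvMatch_iff chars x.2.2 (pvKw_pri_lt x.2 hkp)).mp ⟨x, hx, hm, rfl⟩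
    rw [hbelow x.2.2 hxk] at hxm
    exact Bool.false_ne_true hxm

lemma pvMain (chars : List Char) :
    (if (["pizza", "pasta", "burger", "sandwich"].any
          fun word => PySem.Chars.isIn word.toList chars) = true then "Main Dishes"
     else if (["salad", "soup", "appetizer"].any
          fun word => PySem.Chars.isIn word.toList chars) = true then "Appetizers"
     else if (["dessert", "cake", "ice cream", "cookie"].any
          fun word => PySem.Chars.isIn word.toList chars) = true then "Desserts"
     else if (["drink", "beverage", "coffee", "tea", "soda"].any
          fun word => PySem.Chars.isIn word.toList chars) = true then "Beverages"
     else if (["side", "fries", "chips"].any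
          fun word => PySem.Chars.isIn word.toList chars) = true then "Sides"
     else "General")
    = (if pvFold chars (pvPairs chars.length) 5 < 5 then
         pvCats.getD (pvFold chars (pvPairs chars.length) 5) "General"
       else "General") := by
  set r := pvFold chars (pvPairs chars.length) 5 with hr
  obtain ⟨hub, hlb⟩ := pvFold_value chars
  rw [← hr] at hub hlb
  have hA0 : (["pizza", "pasta", "burger", "sandwich"].any
      (fun word => PySem.Chars.isIn word.toList chars)) = pvM chars 0 := rfl
  have hA1 : (["salad", "soup", "appetizer"].any
      (fun word => PySem.Chars.isIn word.toList chars)) = pvM chars 1 := rfl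
  have hA2 : (["dessert", "cake", "ice cream", "cookie"].any
      (fun word => PySem.Chars.isIn word.toList chars)) = pvM chars 2 := rfl
  have hA3 : (["drink", "beverage", "coffee", "tea", "soda"].any
      (fun word => PySem.Chars.isIn word.toList chars)) = pvM chars 3 := rfl
  have hA4 : (["side", "fries", "chips"].any
      (fun word => PySem.Chars.isIn word.toList chars)) = pvM chars 4 := rfl
  simp only [hA0, hA1, hA2, hA3, hA4]
  cases h0 : pvM chars 0 with
  | true =>
      have : r = 0 := Nat.le_zero.mp (hub 0 h0)
      simp [this, pvCats]
  | false =>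
  cases h1 : pvM chars 1 with
  | true =>
      have hle : r ≤ 1 := hub 1 h1
      have hge : 1 ≤ r := hlb 1 (by omega) (by intro j hj; interval_cases j; exact h0)
      have : r = 1 := le_antisymm hle hge
      simp [this, pvCats]
  | false =>
  cases h2 : pvM chars 2 with
  | true =>
      have hle : r ≤ 2 := hub 2 h2
      have hge : 2 ≤ r := hlb 2 (by omega)
        (by intro j hj; interval_cases j; exacts [h0, h1])
      have : r = 2 := le_antisymm hle hge
      simp [this, pvCats]
  | false =>
  cases h3 : pvM chars 3 with
  | true =>
      have hle : r ≤ 3 := hub 3 h3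
      have hge : 3 ≤ r := hlb 3 (by omega)
        (by intro j hj; interval_cases j; exacts [h0, h1, h2])
      have : r = 3 := le_antisymm hle hge
      simp [this, pvCats]
  | false =>
  cases h4 : pvM chars 4 with
  | true =>
      have hle : r ≤ 4 := hub 4 h4
      have hge : 4 ≤ r := hlb 4 (by omega)
        (by intro j hj; interval_cases j; exacts [h0, h1, h2, h3])
      have : r = 4 := le_antisymm hle hge
      simp [this, pvCats]
  | false =>
      have : r = 5 := le_antisymm (hr ▸ pvFold_le_init ..)
        (hlb 5 le_rfl (by intro j hj; interval_cases j; exacts [h0, h1, h2, h3, h4]))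
      simp [this]

-- ===== VERDICT (by name: the statement is the Claim_ definition above) =====
theorem auto_categorize_item_py_spec : Claim_equal_auto_categorize_item_py := by
  intro item_name _
  unfold Spec_auto_categorize_item_py auto_categorize_item_py auto_categorize_item_py_alt
  simp only [pvDouble_eq, PySem.Str.isIn_eq, pvPairs_def, show pvCats.length = 5 from rfl]
  exact pvMain (PySem.Str.lower item_name).toList
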